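-- pv_equiv track=rewrite | github.com/Neozxc/leetcode | py/3333. Find the Original Typed String II.py | _poly_exp
-- ===== SOURCE A (Python) =====
-- def _poly_exp(i_times_deriv_coeffs, n, mod, inv):
--     f = [0] * n
--     if n > 0:
--         f[0] = 1
--     for i in range(1, n):
--         sum_val = 0
--         for j in range(1, i + 1):
--             term = (i_times_deriv_coeffs[j]) * f[i - j]
--             sum_val += term
--         f[i] = (sum_val % mod * inv[i]) % mod
--
--     return f
-- ===== SOURCE B (Python) =====
-- def _poly_exp(i_times_deriv_coeffs, n, mod, inv):
--     # Divide-and-conquer ("CDQ") online convolution: solve(l, r) finalizes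
--     # f[l:r]; once the left half is done, its contributions to the right
--     # half are added in one block, then the right half is solved.
--     if n <= 0:
--         return []
--     a = i_times_deriv_coeffs
--     f = [0] * n
--     s = [0] * n  # s[i]: contributions a[i-j]*f[j] from already-finalized j
--
--     def solve(l, r):
--         if r - l == 1:
--             f[l] = 1 if l == 0 else (s[l] % mod * inv[l]) % mod
--             return
--         m = (l + r) // 2
--         solve(l, m)
--         for i in range(m, r):
--             for j in range(l, m):
--                 s[i] += a[i - j] * f[j]
--         solve(m, r)
--
--     solve(0, n)
--     return f
-- ===== Notes on version B (the rewrite author's own statement) =====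
-- stated objective: alternative
-- what changed: Replaced the iterative gather recurrence (each f[i] rescans all earlier f values) by a recursive divide-and-conquer (CDQ) online convolution: solve(l,r) finalizes f[l:r] by solving the left half, adding its cross contributions to the right half in one block, then solving the right half; the integer sums contain the same terms, so every mod-reduced value is identical.
import Mathlib
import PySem

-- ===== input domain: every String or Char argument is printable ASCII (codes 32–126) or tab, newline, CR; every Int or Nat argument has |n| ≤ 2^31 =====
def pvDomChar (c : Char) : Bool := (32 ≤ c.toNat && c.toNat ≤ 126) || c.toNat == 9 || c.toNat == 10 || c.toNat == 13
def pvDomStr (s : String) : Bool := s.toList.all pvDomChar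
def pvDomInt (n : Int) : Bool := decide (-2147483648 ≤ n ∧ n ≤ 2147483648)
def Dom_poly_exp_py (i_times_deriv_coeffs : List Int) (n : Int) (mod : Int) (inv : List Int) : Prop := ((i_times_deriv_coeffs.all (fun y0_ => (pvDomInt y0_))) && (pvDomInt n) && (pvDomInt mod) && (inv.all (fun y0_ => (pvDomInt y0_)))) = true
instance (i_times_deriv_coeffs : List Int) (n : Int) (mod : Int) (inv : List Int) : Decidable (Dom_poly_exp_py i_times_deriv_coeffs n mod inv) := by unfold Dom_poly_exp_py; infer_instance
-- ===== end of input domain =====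

-- B replaces A's iterative gather recurrence by a recursive divide-and-conquer (CDQ)
-- online convolution over the same exact integer sums; same values, same O(n^2) cost.

-- ===== PORT A =====
def poly_exp_py (i_times_deriv_coeffs : List Int) (n : Int) (mod : Int) (inv : List Int) : List Int :=
  let f : List Int := List.replicate n.toNat 0
  let f := if n > 0 then PySem.List.pySetD f 0 1 else f
  (PySem.List.pyRange 1 n 1).foldl (fun f i =>
    let sum_val := (PySem.List.pyRange 1 (i + 1) 1).foldl (fun sum_val j =>
      sum_val + (PySem.List.pyGetD i_times_deriv_coeffs j 0) * (PySem.List.pyGetD f (i - j) 0)) 0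
    PySem.List.pySetD f i
      (PySem.Int.mod (PySem.Int.mod sum_val mod * PySem.List.pyGetD inv i 0) mod)) f

-- ===== PORT B =====
-- B's recursive solve(l, r) over the state (f, s); the fuel argument only makes the
-- structural recursion total (Python's solve is never called with r ≤ l, and fuel
-- n suffices since r - l shrinks at every call).
def pvBSolve (a : List Int) (mod : Int) (inv : List Int) : Nat → (List Int × List Int) → Int → Int → (List Int × List Int)
  | 0, st, _, _ => st
  | (fuel+1), st, l, r =>
    if r - l ≤ 1 then
      if r - l = 1 then
        let fi : Int := if l = 0 then 1 else
          PySem.Int.mod (PySem.Int.mod (PySem.List.pyGetD st.2 l 0) mod * PySem.List.pyGetD inv l 0) mod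
        (PySem.List.pySetD st.1 l fi, st.2)
      else st
    else
      let m := PySem.Int.floordiv (l + r) 2
      let st1 := pvBSolve a mod inv fuel st l m
      let s2 := (PySem.List.pyRange m r 1).foldl (fun s i =>
        (PySem.List.pyRange l m 1).foldl (fun s j =>
          PySem.List.pySetD s i
            (PySem.List.pyGetD s i 0 + PySem.List.pyGetD a (i - j) 0 * PySem.List.pyGetD st1.1 j 0)) s) st1.2
      pvBSolve a mod inv fuel (st1.1, s2) m r

def poly_exp_py_alt (i_times_deriv_coeffs : List Int) (n : Int) (mod : Int) (inv : List Int) : List Int :=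
  if n ≤ 0 then []
  else (pvBSolve i_times_deriv_coeffs mod inv n.toNat (List.replicate n.toNat 0, List.replicate n.toNat 0) 0 n).1

-- ===== PRECONDITION & SPEC =====
-- Pre_: exactly the inputs where the Python A returns normally; for n ≥ 2 A needs mod ≠ 0
-- (ZeroDivisionError) and both lists of length ≥ n (IndexError); for n ≤ 1 A is total.
def Pre_poly_exp_py (i_times_deriv_coeffs : List Int) (n : Int) (mod : Int) (inv : List Int) : Prop :=
  n ≤ 1 ∨ (mod ≠ 0 ∧ n ≤ (i_times_deriv_coeffs.length : Int) ∧ n ≤ (inv.length : Int))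
instance (i_times_deriv_coeffs : List Int) (n : Int) (mod : Int) (inv : List Int) : Decidable (Pre_poly_exp_py i_times_deriv_coeffs n mod inv) := by unfold Pre_poly_exp_py; infer_instance

def pvWitness_poly_exp_py : List Int × Int × Int × List Int := ([0, 2, 3], 3, 7, [0, 4, 5])

def Spec_poly_exp_py (i_times_deriv_coeffs : List Int) (n : Int) (mod : Int) (inv : List Int) (out : List Int) : Prop := out = poly_exp_py_alt i_times_deriv_coeffs n mod inv
instance (i_times_deriv_coeffs : List Int) (n : Int) (mod : Int) (inv : List Int) (out : List Int) : Decidable (Spec_poly_exp_py i_times_deriv_coeffs n mod inv out) := by unfold Spec_poly_exp_py; infer_instance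

-- ===== CLAIM (what is proved, stated in full; the proofs are below) =====
def Claim_equal_poly_exp_py : Prop := ∀ (i_times_deriv_coeffs : List Int) (n : Int) (mod : Int) (inv : List Int), Dom_poly_exp_py i_times_deriv_coeffs n mod inv → Pre_poly_exp_py i_times_deriv_coeffs n mod inv → Spec_poly_exp_py i_times_deriv_coeffs n mod inv (poly_exp_py i_times_deriv_coeffs n mod inv)

-- ===== LEMMAS AND PROOFS =====

-- the coefficient read c[j] (in-range under Pre_)
def pvCf (c : List Int) (j : Int) : Int := PySem.List.pyGetD c j 0

-- the finalization f[i] = (s % mod * inv[i]) % mod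
def pvStp (mod : Int) (inv : List Int) (i s : Int) : Int :=
  PySem.Int.mod (PySem.Int.mod s mod * PySem.List.pyGetD inv i 0) mod

-- the common specification value: f[k] of the recurrence
def pvG (c : List Int) (mod : Int) (inv : List Int) : Nat → Int
  | 0 => 1
  | (k+1) => pvStp mod inv ((k : Int) + 1)
      (((List.range (k+1)).map (fun (t : Nat) => pvCf c (1 + (t : Int)) * pvG c mod inv (k - t))).sum)
decreasing_by omega

-- the f array after the first K entries are finalized
def pvF (c : List Int) (mod : Int) (inv : List Int) (N K : Nat) : List Int :=
  (List.range N).map (fun x => if x < K then pvG c mod inv x else 0)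

-- partial convolution sum: contributions of f[0..t-1] to coefficient x
def pvS (c : List Int) (mod : Int) (inv : List Int) (t x : Nat) : Int :=
  ((List.range t).map (fun (m : Nat) => pvCf c ((x : Int) - (m : Int)) * pvG c mod inv m)).sum

-- block of contributions of f[l..m-1] to coefficient x (B's cross step)
def pvSeg (c : List Int) (mod : Int) (inv : List Int) (l m : Int) (x : Nat) : Int :=
  ((PySem.List.pyRange l m 1).map (fun j => pvCf c ((x : Int) - j) * pvG c mod inv j.toNat)).sum

-- pyGetD on a range-map: reads the mapped function
theorem pv_getD_map_range (g : Nat → Int) (N : Nat) (i : Int) (h0 : 0 ≤ i) (hN : i < (N : Int)) :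
    PySem.List.pyGetD ((List.range N).map g) i 0 = g i.toNat := by
  rw [PySem.List.pyGetD_eq_getElem _ _ h0 (by simpa using hN)]
  simp

-- pySetD on a range-map: a pointwise function update
theorem pv_set_map_range (f : Nat → Int) (N : Nat) (i : Int) (h0 : 0 ≤ i) (_hN : i < (N : Int)) (v : Int) :
    PySem.List.pySetD ((List.range N).map f) i v
      = (List.range N).map (fun x => if x = i.toNat then v else f x) := by
  rw [PySem.List.pySetD_of_nonneg _ _ h0]
  apply List.ext_getElem
  · simp
  · intro p h1 h2
    simp only [List.getElem_set, List.getElem_map, List.getElem_range]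
    by_cases h : i.toNat = p
    · subst h
      simp
    · rw [if_neg h, if_neg (by omega)]

-- summing a range-map in reflected order
theorem pv_sum_reflect (n : Nat) (f : Nat → Int) :
    ((List.range n).map f).sum = ((List.range n).map (fun t => f (n - 1 - t))).sum := by
  conv_lhs => rw [← List.sum_reverse, ← List.map_reverse, List.range_eq_range',
    List.reverse_range', List.map_map]
  simp [Function.comp_def]

-- one more pushed contribution
theorem pv_pvS_succ (c : List Int) (mod : Int) (inv : List Int) (t x : Nat) :
    pvS c mod inv (t + 1) x
      = pvS c mod inv t x + pvCf c ((x : Int) - (t : Int)) * pvG c mod inv t := by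
  unfold pvS
  exact List.sum_range_succ _ t

-- the recurrence value written through the full convolution sum
theorem pv_pvG_eq_pvS (c : List Int) (mod : Int) (inv : List Int) (k' : Nat) :
    pvG c mod inv (k' + 1) = pvStp mod inv ((k' : Int) + 1) (pvS c mod inv (k' + 1) (k' + 1)) := by
  have hbody : pvS c mod inv (k' + 1) (k' + 1)
      = ((List.range (k' + 1)).map (fun (t : Nat) => pvCf c (1 + (t : Int)) * pvG c mod inv (k' - t))).sum := by
    unfold pvS
    rw [pv_sum_reflect]
    congr 1
    apply List.map_congr_left
    intro t ht
    rw [List.mem_range] at ht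
    have h1 : k' + 1 - 1 - t = k' - t := by omega
    have h2 : ((k' + 1 : Nat) : Int) - ((k' - t : Nat) : Int) = 1 + (t : Int) := by omega
    rw [h1, h2]
  rw [hbody, pvG]

-- pvG 0 is 1
theorem pv_pvG_zero (c : List Int) (mod : Int) (inv : List Int) : pvG c mod inv 0 = 1 := by
  rw [pvG]

-- finalizing entry k of the f array
theorem pv_F_set (c : List Int) (mod : Int) (inv : List Int) (N k : Nat) (hk : k < N) :
    PySem.List.pySetD (pvF c mod inv N k) (k : Int) (pvG c mod inv k) = pvF c mod inv N (k + 1) := by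
  unfold pvF
  rw [pv_set_map_range _ _ _ (by omega) (by omega)]
  apply List.map_congr_left
  intro x hx
  rw [List.mem_range] at hx
  have hkk : ((k : Int)).toNat = k := by omega
  rw [hkk]
  by_cases hxk : x = k
  · subst hxk
    rw [if_pos rfl, if_pos (by omega)]
  · rw [if_neg hxk]
    by_cases hlt : x < k
    · rw [if_pos hlt, if_pos (by omega)]
    · rw [if_neg hlt, if_neg (by omega)]

-- a whole segment of pushed contributions extends the partial sum
theorem pv_seg_full (c : List Int) (mod : Int) (inv : List Int) :
    ∀ (e : Nat) (l m : Int) (x : Nat), e = (m - l).toNat → 0 ≤ l → l ≤ m →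
      pvS c mod inv l.toNat x + pvSeg c mod inv l m x = pvS c mod inv m.toNat x := by
  intro e
  induction e with
  | zero =>
    intro l m x he h0 hlm
    have hml : m = l := by omega
    subst hml
    unfold pvSeg
    rw [PySem.List.pyRange_one_eq_nil (by omega)]
    simp
  | succ e ih =>
    intro l m x he h0 hlm
    have hlt : l < m := by omega
    unfold pvSeg
    rw [PySem.List.pyRange_one_cons hlt]
    simp only [List.map_cons, List.sum_cons]
    have step : pvS c mod inv l.toNat x + pvCf c ((x : Int) - l) * pvG c mod inv l.toNat
        = pvS c mod inv (l + 1).toNat x := by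
      have h1 : (l + 1).toNat = l.toNat + 1 := by omega
      rw [h1, pv_pvS_succ]
      have h2 : ((l.toNat : Nat) : Int) = l := by omega
      rw [h2]
    calc pvS c mod inv l.toNat x + (pvCf c ((x : Int) - l) * pvG c mod inv l.toNat +
          ((PySem.List.pyRange (l + 1) m 1).map (fun j => pvCf c ((x : Int) - j) * pvG c mod inv j.toNat)).sum)
        = pvS c mod inv (l + 1).toNat x + pvSeg c mod inv (l + 1) m x := by
          unfold pvSeg; rw [← step]; ring
      _ = pvS c mod inv m.toNat x := ih (l + 1) m x (by omega) (by omega) (by omega)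

-- B's inner cross loop for one fixed target index i
theorem pv_cross_one (c : List Int) (mod : Int) (inv : List Int) (N : Nat) (fv : List Int)
    (i : Int) (h0 : 0 ≤ i) (hN : i < (N : Int)) :
    ∀ (e : Nat) (l m : Int) (σ : Nat → Int), e = (m - l).toNat →
      (∀ j : Int, l ≤ j → j < m → PySem.List.pyGetD fv j 0 = pvG c mod inv j.toNat) →
      (PySem.List.pyRange l m 1).foldl (fun s j =>
        PySem.List.pySetD s i
          (PySem.List.pyGetD s i 0 + PySem.List.pyGetD c (i - j) 0 * PySem.List.pyGetD fv j 0))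
        ((List.range N).map σ)
      = (List.range N).map (fun x => if x = i.toNat then σ x + pvSeg c mod inv l m x else σ x) := by
  intro e
  induction e with
  | zero =>
    intro l m σ he hf
    rw [PySem.List.pyRange_one_eq_nil (by omega)]
    simp only [List.foldl_nil]
    apply List.map_congr_left
    intro x hx
    by_cases hxi : x = i.toNat
    · rw [if_pos hxi]
      unfold pvSeg
      rw [PySem.List.pyRange_one_eq_nil (by omega)]
      simp
    · rw [if_neg hxi]
  | succ e ih =>
    intro l m σ he hf
    have hlt : l < m := by omega
    rw [PySem.List.pyRange_one_cons hlt]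
    simp only [List.foldl_cons]
    rw [pv_getD_map_range σ N i h0 hN, hf l (le_refl l) hlt,
      pv_set_map_range _ N i h0 hN]
    rw [ih (l + 1) m _ (by omega) (fun j hj1 hj2 => hf j (by omega) hj2)]
    apply List.map_congr_left
    intro x hx
    rw [List.mem_range] at hx
    by_cases hxi : x = i.toNat
    · subst hxi
      rw [if_pos rfl, if_pos rfl, if_pos rfl]
      have hxint : ((i.toNat : Nat) : Int) = i := by omega
      unfold pvSeg
      rw [PySem.List.pyRange_one_cons hlt]
      simp only [List.map_cons, List.sum_cons]
      unfold pvCf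
      rw [hxint]
      ring
    · rw [if_neg hxi, if_neg hxi, if_neg hxi]

-- B's full cross loop: every coefficient in [m, r) receives the left block
theorem pv_cross (c : List Int) (mod : Int) (inv : List Int) (N : Nat) (fv : List Int) (l mid : Int)
    (hf : ∀ j : Int, l ≤ j → j < mid → PySem.List.pyGetD fv j 0 = pvG c mod inv j.toNat) :
    ∀ (e : Nat) (m r : Int) (σ : Nat → Int), e = (r - m).toNat → 0 ≤ m → r ≤ (N : Int) →
      (PySem.List.pyRange m r 1).foldl (fun s i =>
        (PySem.List.pyRange l mid 1).foldl (fun s j =>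
          PySem.List.pySetD s i
            (PySem.List.pyGetD s i 0 + PySem.List.pyGetD c (i - j) 0 * PySem.List.pyGetD fv j 0)) s)
        ((List.range N).map σ)
      = (List.range N).map (fun (x : Nat) =>
          if m ≤ (x : Int) ∧ (x : Int) < r then σ x + pvSeg c mod inv l mid x else σ x) := by
  intro e
  induction e with
  | zero =>
    intro m r σ he h0 hr
    rw [PySem.List.pyRange_one_eq_nil (show r ≤ m by omega)]
    simp only [List.foldl_nil]
    apply List.map_congr_left
    intro x hx
    rw [if_neg (by omega)]
  | succ e ih =>
    intro m r σ he h0 hr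
    have hlt : m < r := by omega
    rw [PySem.List.pyRange_one_cons hlt]
    simp only [List.foldl_cons]
    rw [pv_cross_one c mod inv N fv m h0 (lt_of_lt_of_le hlt hr) (mid - l).toNat l mid σ rfl hf]
    rw [ih (m + 1) r _ (by omega) (by omega) hr]
    apply List.map_congr_left
    intro x hx
    rw [List.mem_range] at hx
    by_cases hxm : x = m.toNat
    · rw [if_neg (show ¬ (m + 1 ≤ (x : Int) ∧ (x : Int) < r) by omega),
        if_pos hxm, if_pos (show m ≤ (x : Int) ∧ (x : Int) < r by omega)]
    · by_cases hin : m + 1 ≤ (x : Int) ∧ (x : Int) < r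
      · rw [if_pos hin, if_neg hxm, if_pos (show m ≤ (x : Int) ∧ (x : Int) < r by omega)]
      · rw [if_neg hin, if_neg hxm, if_neg (show ¬ (m ≤ (x : Int) ∧ (x : Int) < r) by omega)]

-- B's solve: from (f finalized below l, s holding the sums for [l, r)) to f finalized below r
theorem pv_solve_spec (c : List Int) (mod : Int) (inv : List Int) (N : Nat) :
    ∀ (fuel : Nat), ∀ (l r : Int) (σ : Nat → Int), (r - l).toNat ≤ fuel → 0 ≤ l → l < r → r ≤ (N : Int) →
      (∀ x : Nat, l ≤ (x : Int) → (x : Int) < r → σ x = pvS c mod inv l.toNat x) →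
      ∃ σ' : Nat → Int, (∀ x : Nat, ((x : Int) < l ∨ r ≤ (x : Int)) → σ' x = σ x) ∧
        pvBSolve c mod inv fuel (pvF c mod inv N l.toNat, (List.range N).map σ) l r
          = (pvF c mod inv N r.toNat, (List.range N).map σ') := by
  intro fuel
  induction fuel with
  | zero =>
    intro l r σ hd h0 hlr hrN hσ
    omega
  | succ fuel ih =>
    intro l r σ hd h0 hlr hrN hσ
    by_cases hbase : r - l = 1
    · refine ⟨σ, fun x _ => rfl, ?_⟩
      rw [pvBSolve, if_pos (by omega : r - l ≤ 1), if_pos hbase]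
      have hfi : (if l = 0 then (1 : Int) else
          PySem.Int.mod (PySem.Int.mod (PySem.List.pyGetD ((List.range N).map σ) l 0) mod
            * PySem.List.pyGetD inv l 0) mod) = pvG c mod inv l.toNat := by
        by_cases hl0 : l = 0
        · subst hl0
          rw [if_pos rfl]
          simp [pv_pvG_zero]
        · rw [if_neg hl0]
          rw [pv_getD_map_range σ N l h0 (by omega), hσ l.toNat (by omega) (by omega)]
          obtain ⟨k', hk'⟩ : ∃ k', l.toNat = k' + 1 := ⟨l.toNat - 1, by omega⟩
          rw [hk', pv_pvG_eq_pvS]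
          unfold pvStp
          have hc1 : ((k' : Int) + 1) = l := by omega
          rw [hc1]
      simp only
      rw [hfi]
      have hFs := pv_F_set c mod inv N l.toNat (by omega)
      rw [show ((l.toNat : Nat) : Int) = l by omega] at hFs
      rw [hFs]
      have hr : r.toNat = l.toNat + 1 := by omega
      rw [hr]
    · have hge2 : l + 2 ≤ r := by omega
      rw [pvBSolve, if_neg (by omega : ¬ r - l ≤ 1)]
      simp only
      set m := PySem.Int.floordiv (l + r) 2 with hm
      have hml : l + 1 ≤ m := (PySem.Int.le_floordiv_iff_mul_le (by omega)).mpr (by omega)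
      have hmr : m < r := (PySem.Int.floordiv_lt_iff_lt_mul (by omega)).mpr (by omega)
      obtain ⟨σ₁, hσ₁, heq₁⟩ := ih l m σ (by omega) h0 (by omega) (by omega)
        (fun x hx1 hx2 => hσ x hx1 (by omega))
      rw [heq₁]
      simp only
      have hfv : ∀ j : Int, l ≤ j → j < m → PySem.List.pyGetD (pvF c mod inv N m.toNat) j 0
          = pvG c mod inv j.toNat := by
        intro j hj1 hj2
        unfold pvF
        rw [pv_getD_map_range _ N j (by omega) (by omega), if_pos (by omega)]
      rw [pv_cross c mod inv N (pvF c mod inv N m.toNat) l m hfv (r - m).toNat m r σ₁ rfl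
        (by omega) hrN]
      have hσ₂h : ∀ x : Nat, m ≤ (x : Int) → (x : Int) < r →
          (fun (x : Nat) => if m ≤ (x : Int) ∧ (x : Int) < r then σ₁ x + pvSeg c mod inv l m x else σ₁ x) x
            = pvS c mod inv m.toNat x := by
        intro x hx1 hx2
        simp only
        rw [if_pos ⟨hx1, hx2⟩, hσ₁ x (by omega), hσ x (by omega) (by omega)]
        exact pv_seg_full c mod inv (m - l).toNat l m x rfl h0 (by omega)
      obtain ⟨σ₃, hσ₃, heq₃⟩ := ih m r _ (by omega) (by omega) hmr hrN hσ₂h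
      refine ⟨σ₃, ?_, heq₃⟩
      intro x hx
      rw [hσ₃ x (by omega)]
      rw [if_neg (by omega)]
      exact hσ₁ x (by omega)

-- A's main loop: from the first k entries finalized to all of them
theorem pv_A_loop (c : List Int) (n mod : Int) (inv : List Int) :
    ∀ (d k : Nat), 1 ≤ k → d = (n - (k : Int)).toNat →
      (PySem.List.pyRange (k : Int) n 1).foldl
        (fun f i =>
          let sum_val := (PySem.List.pyRange 1 (i + 1) 1).foldl (fun sum_val j =>
            sum_val + (PySem.List.pyGetD c j 0) * (PySem.List.pyGetD f (i - j) 0)) 0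
          PySem.List.pySetD f i
            (PySem.Int.mod (PySem.Int.mod sum_val mod * PySem.List.pyGetD inv i 0) mod))
        (pvF c mod inv n.toNat k)
      = pvF c mod inv n.toNat n.toNat := by
  intro d
  induction d with
  | zero =>
    intro k hk hd
    have hnk : n ≤ (k : Int) := by omega
    rw [PySem.List.pyRange_one_eq_nil hnk]
    simp only [List.foldl_nil]
    unfold pvF
    apply List.map_congr_left
    intro x hx
    rw [List.mem_range] at hx
    rw [if_pos (by omega), if_pos (by omega)]
  | succ d ih =>
    intro k hk hd
    have hkn : (k : Int) < n := by omega
    have hkN : k < n.toNat := by omega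
    rw [PySem.List.pyRange_one_cons hkn]
    simp only [List.foldl_cons]
    have hsum : (PySem.List.pyRange 1 ((k : Int) + 1) 1).foldl (fun sum_val j =>
        sum_val + (PySem.List.pyGetD c j 0) * (PySem.List.pyGetD (pvF c mod inv n.toNat k) ((k : Int) - j) 0)) 0
        = ((List.range k).map (fun (t : Nat) => pvCf c (1 + (t : Int)) * pvG c mod inv (k - 1 - t))).sum := by
      rw [PySem.List.pyRange_one 1 ((k : Int) + 1)]
      have hkk : (((k : Int) + 1) - 1).toNat = k := by omega
      rw [hkk, List.foldl_map, PySem.List.foldl_add, zero_add]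
      congr 1
      apply List.map_congr_left
      intro t ht
      rw [List.mem_range] at ht
      unfold pvF
      rw [pv_getD_map_range _ _ _ (by omega) (by omega)]
      have h1 : ((k : Int) - (1 + (t : Int))).toNat = k - 1 - t := by omega
      rw [h1, if_pos (by omega)]
      rfl
    rw [hsum]
    have hG : PySem.Int.mod (PySem.Int.mod
        ((List.range k).map (fun (t : Nat) => pvCf c (1 + (t : Int)) * pvG c mod inv (k - 1 - t))).sum mod
        * PySem.List.pyGetD inv (k : Int) 0) mod = pvG c mod inv k := by
      obtain ⟨k', rfl⟩ : ∃ k', k = k' + 1 := ⟨k - 1, by omega⟩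
      rw [pvG]
      unfold pvStp
      simp only [Nat.add_sub_cancel]
      have hcast : ((k' + 1 : Nat) : Int) = (k' : Int) + 1 := by push_cast; ring
      rw [hcast]
    rw [hG, pv_F_set c mod inv n.toNat k hkN]
    have hcast : ((k : Int) + 1) = (((k + 1 : Nat) : Int)) := by push_cast; ring
    rw [hcast]
    exact ih (k + 1) (by omega) (by omega)

theorem poly_exp_py_spec : Claim_equal_poly_exp_py := by
  intro c n mod inv _ _
  unfold Spec_poly_exp_py
  by_cases hn : n ≤ 0
  · have h0 : n.toNat = 0 := by omega
    simp only [poly_exp_py, poly_exp_py_alt]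
    rw [if_pos hn]
    simp [h0, PySem.List.pyRange_one_eq_nil (show n ≤ 1 by omega), show ¬ (n > 0) by omega]
  · have hn' : 0 < n := by omega
    have hrep : List.replicate n.toNat (0 : Int) = pvF c mod inv n.toNat 0 := by
      unfold pvF
      rw [List.map_congr_left (g := fun _ => (0 : Int)) (fun x _ => by rw [if_neg (by omega)])]
      simp [List.map_const']
    have hrep0 : List.replicate n.toNat (0 : Int)
        = (List.range n.toNat).map (fun _ => (0 : Int)) := by
      simp [List.map_const']
    -- B side
    obtain ⟨σ', _, heqB⟩ := pv_solve_spec c mod inv n.toNat n.toNat 0 n (fun _ => 0)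
      (by omega) (by omega) hn' (by omega)
      (fun x _ hx2 => by simp [pvS])
    simp only [Int.toNat_zero] at heqB
    have hB : poly_exp_py_alt c n mod inv = pvF c mod inv n.toNat n.toNat := by
      simp only [poly_exp_py_alt]
      rw [if_neg hn]
      rw [show (List.replicate n.toNat (0 : Int), List.replicate n.toNat (0 : Int))
          = (pvF c mod inv n.toNat 0, (List.range n.toNat).map (fun _ => (0 : Int)))
          from congrArg₂ Prod.mk hrep hrep0]
      rw [heqB]
    -- A side
    have hset0 : PySem.List.pySetD (List.replicate n.toNat (0 : Int)) 0 1 = pvF c mod inv n.toNat 1 := by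
      rw [hrep, show (0 : Int) = ((0 : Nat) : Int) by rfl, ← pv_pvG_zero c mod inv]
      exact pv_F_set c mod inv n.toNat 0 (by omega)
    have hA := pv_A_loop c n mod inv (n - 1).toNat 1 (by omega) (by omega)
    simp only [Nat.cast_one] at hA
    simp only [poly_exp_py]
    rw [if_pos (show n > 0 by omega), hset0, hA, hB]
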